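-- pv_equiv track=rewrite | github.com/Gpossas/Wizards-Auctions | auctions/templatetags/price_format.py | format_string_as_int
-- ===== SOURCE A (Python) =====
-- def format_string_as_int(string: str) -> str:
--     """
--     remove non-numeric characters and left zeroes\n
--     A ValueError is raised if string is entirely non-numeric\n
--     Examples:\n
--         '$ 89.45' -> 8945\n
--         '0000' -> 0\n
--         '45bar64' -> 4564\n
--         'foo' -> raise ValueError
--     """
--
--     num = ''
--     first_digit_found = False
--     for char in string:
--         if not first_digit_found and '1' <= char <= '9':
--             first_digit_found = True
--         if first_digit_found and '0' <= char <= '9':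
--             num = ''.join((num, char))
--     return num or '0'
-- ===== SOURCE B (Python) =====
-- def format_string_as_int(string: str) -> str:
--     digits = ''.join(c for c in string if '0' <= c <= '9')
--     return digits.lstrip('0') or '0'
-- ===== Notes on version B (the rewrite author's own statement) =====
-- stated objective: simpler
-- what changed: Replaces the single-pass first_digit_found flag loop with two phases: collect all ASCII digits with a filter, then strip the leading zeros and fall back to a zero string if none remain.
import Mathlib
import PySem

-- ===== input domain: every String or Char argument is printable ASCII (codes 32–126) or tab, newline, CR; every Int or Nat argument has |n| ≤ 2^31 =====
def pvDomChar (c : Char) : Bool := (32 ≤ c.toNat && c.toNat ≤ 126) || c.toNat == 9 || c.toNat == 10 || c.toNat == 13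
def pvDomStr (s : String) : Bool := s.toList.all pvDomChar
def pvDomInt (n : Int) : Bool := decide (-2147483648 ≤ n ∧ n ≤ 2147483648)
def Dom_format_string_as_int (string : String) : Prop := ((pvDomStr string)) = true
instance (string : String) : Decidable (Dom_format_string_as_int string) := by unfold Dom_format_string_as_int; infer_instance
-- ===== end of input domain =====

-- B collects the digits with a filter and then strips leading zeros (two phases), instead of A's
-- single pass with a first_digit_found flag; same result, objective: simpler.

-- ===== PORT A =====
-- one loop step of A: update first_digit_found, then conditionally append char
def pvStepA (st : List Char × Bool) (c : Char) : List Char × Bool :=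
  let fdf := if !st.2 && ('1' ≤ c && c ≤ '9') then true else st.2
  let num := if fdf && ('0' ≤ c && c ≤ '9') then st.1 ++ [c] else st.1
  (num, fdf)

def format_string_as_int (string : String) : String :=
  let r := string.toList.foldl pvStepA ([], false)
  if r.1 = [] then "0" else String.ofList r.1   -- 'num or '0''

-- ===== PORT B =====
def format_string_as_int_alt (string : String) : String :=
  let digits := string.toList.filter (fun c => '0' ≤ c && c ≤ '9')   -- ''.join(c for c in string if '0'<=c<='9')
  let stripped := digits.dropWhile (fun c => c == '0')               -- .lstrip('0')
  if stripped = [] then "0" else String.ofList stripped                  -- 'or '0''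

-- ===== PRECONDITION & SPEC =====
def Spec_format_string_as_int (string : String) (out : String) : Prop := out = format_string_as_int_alt string
instance (string : String) (out : String) : Decidable (Spec_format_string_as_int string out) := by unfold Spec_format_string_as_int; infer_instance

-- ===== CLAIM (what is proved, stated in full; the proofs are below) =====
def Claim_equal_format_string_as_int : Prop := ∀ (string : String), Dom_format_string_as_int string → Spec_format_string_as_int string (format_string_as_int string)

-- ===== LEMMAS AND PROOFS =====

-- once the flag is true, A just appends every digit
theorem pvFoldA_true (l : List Char) (num : List Char) :
    l.foldl pvStepA (num, true) = (num ++ l.filter (fun c => '0' ≤ c && c ≤ '9'), true) := by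
  induction l generalizing num with
  | nil => simp
  | cons c l ih =>
    by_cases h : ('0' ≤ c && c ≤ '9') = true
    · simp [List.foldl_cons, pvStepA, h, ih]
    · simp [List.foldl_cons, pvStepA, h, ih]

-- a char in 1..9 iff it is a digit and not '0'
theorem pvChar_split (c : Char) :
    ('1' ≤ c && c ≤ '9') = (('0' ≤ c && c ≤ '9') && !(c == '0')) := by
  by_cases h : c = '0'
  · subst h; decide
  · have hne : (c == '0') = false := by simpa using h
    have hv : c.val.toNat ≠ ('0' : Char).val.toNat := by
      intro e; exact h (Char.ext (by exact UInt32.toNat_inj.mp e))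
    simp only [hne, Bool.not_false, Bool.and_true, ← Bool.decide_and, decide_eq_decide,
      Char.le_def, UInt32.le_iff_toNat_le]
    have e0 : ('0' : Char).val.toNat = 48 := rfl
    have e1 : ('1' : Char).val.toNat = 49 := rfl
    constructor
    · rintro ⟨h1, h2⟩; exact ⟨by omega, by omega⟩
    · rintro ⟨h1, h2⟩; exact ⟨by omega, by omega⟩

-- from the initial state, A computes the digits with leading zeros dropped
theorem pvFoldA_false (l : List Char) :
    (l.foldl pvStepA ([], false)).1
      = (l.filter (fun c => '0' ≤ c && c ≤ '9')).dropWhile (fun c => c == '0') := by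
  induction l with
  | nil => simp
  | cons c l ih =>
    by_cases hd : ('0' ≤ c && c ≤ '9') = true
    · by_cases h0 : (c == '0') = true
      · have h1 : ('1' ≤ c && c ≤ '9') = false := by
          rw [pvChar_split, hd, h0]; rfl
        simp [List.foldl_cons, pvStepA, h1, hd, ih, h0]
      · have h0' : (c == '0') = false := by simpa using h0
        have h1 : ('1' ≤ c && c ≤ '9') = true := by
          rw [pvChar_split, hd, h0']; rfl
        simp [List.foldl_cons, pvStepA, h1, hd, pvFoldA_true, h0']
    · have hd' : ('0' ≤ c && c ≤ '9') = false := by simpa using hd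
      have h1 : ('1' ≤ c && c ≤ '9') = false := by
        rw [pvChar_split, hd']; rfl
      simp [List.foldl_cons, pvStepA, h1, hd', ih]

-- ===== VERDICT (by name: the statement is the Claim_ definition above) =====
theorem format_string_as_int_spec : Claim_equal_format_string_as_int := by
  intro s _
  unfold Spec_format_string_as_int format_string_as_int format_string_as_int_alt
  simp [pvFoldA_false]
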